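-- pv_equiv track=rewrite | github.com/rg1107/leetcode | 3873-subsequence-sum-after-capping-elements/subsequence-sum-after-capping-elements.py | subsequenceSumAfterCapping
-- ===== SOURCE A (Python) =====
-- from typing import List
--
-- def subsequenceSumAfterCapping(A: List[int], k: int) -> List[bool]:
--     A.sort()
--     n = len(A)
--     res = [False] * n
--     dp = 1
--     mask = (1 << k + 1) - 1
--     i = 0
--     for x in range(1, n + 1):
--         while i < n and A[i] <= x:
--             dp |= (dp << A[i]) & mask
--             i += 1
--         v = max(k % x, k - (n - i) * x)
--         for j in range(v, k + 1, x):
--             if dp & (1 << j):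
--                 res[x - 1] = True
--                 break
--     return res
-- ===== SOURCE B (Python) =====
-- from typing import List
--
-- def subsequenceSumAfterCapping(A: List[int], k: int) -> List[bool]:
--     A.sort()
--     n = len(A)
--     INF = n + 1
--     # m[s] = smallest cap x under which some subset of the capped array sums to s,
--     # built once by a single knapsack pass (elements > n never fit under any cap).
--     m = [INF] * (k + 1)
--     if m:
--         m[0] = 0
--     for a in A:
--         if a > n:
--             break
--         for s in range(k, a - 1, -1):
--             if m[s] == INF and m[s - a] < INF:
--                 m[s] = a
--     res = []
--     for x in range(1, n + 1):
--         more = sum(1 for a in A if a > x)  # elements that get capped down to x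
--         ok = False
--         s = k
--         for _ in range(more + 1):
--             if s < 0:
--                 break
--             if m[s] <= x:
--                 ok = True
--                 break
--             s -= x
--         res.append(ok)
--     return res
-- ===== Notes on version B (the rewrite author's own statement) =====
-- stated objective: alternative
-- what changed: A interleaves queries with an incremental two-pointer sweep that grows a subset-sum bitmask cap by cap; B decouples the stages: one knapsack pass over the sorted list computes m[s] = smallest cap under which sum s is reachable, then every cap is answered independently from m by walking s = k, k-x, ... downwards.
import Mathlib
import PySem

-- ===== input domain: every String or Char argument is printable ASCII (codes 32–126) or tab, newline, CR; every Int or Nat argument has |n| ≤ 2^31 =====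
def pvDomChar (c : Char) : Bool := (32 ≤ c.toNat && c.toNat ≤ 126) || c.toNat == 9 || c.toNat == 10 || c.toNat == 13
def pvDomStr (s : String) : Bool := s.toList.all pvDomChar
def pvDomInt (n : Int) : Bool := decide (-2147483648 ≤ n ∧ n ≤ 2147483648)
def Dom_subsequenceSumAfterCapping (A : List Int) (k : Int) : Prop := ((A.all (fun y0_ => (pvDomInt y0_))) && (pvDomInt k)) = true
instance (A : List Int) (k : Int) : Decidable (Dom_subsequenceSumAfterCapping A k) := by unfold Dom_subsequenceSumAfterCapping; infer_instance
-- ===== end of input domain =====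

-- B replaces A's incremental two-pointer sweep (a bitmask subset-sum dp grown cap by cap,
-- queried between insertions) by a two-stage algorithm: ONE knapsack pass over the sorted list
-- computes m[s] = smallest cap under which sum s is reachable, and each cap is then answered
-- independently from m by walking s = k, k-x, ... downwards.
-- Both A and B sort the argument list in place (same side effect); the claim is about the return value.

-- ===== PORT A =====
-- while i < n and A[i] <= x: dp |= (dp << A[i]) & mask; i += 1   (fuel = n - i; Pre_ gives A[i] ≥ 0, so .toNat is exact)
def pvWhileA (As : List Int) (x : Int) (mask : Nat) : Nat → Nat → Nat → Nat × Nat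
  | 0, dp, i => (dp, i)
  | f + 1, dp, i =>
    if decide (i < As.length) && decide (As.getD i 0 ≤ x) then
      pvWhileA As x mask f (dp ||| ((dp <<< (As.getD i 0).toNat) &&& mask)) (i + 1)
    else (dp, i)

-- for j in range(v, k+1, x): if dp & (1 << j): … break   (j ≥ 0 inside Pre_, so .toNat is exact)
def pvCheckA (dp : Nat) : List Int → Bool
  | [] => false
  | j :: rest => if dp &&& (1 <<< j.toNat) ≠ 0 then true else pvCheckA dp rest

def pvStepA (As : List Int) (k : Int) (mask : Nat) (st : List Bool × Nat × Nat) (x : Int) :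
    List Bool × Nat × Nat :=
  let n := As.length
  let w := pvWhileA As x mask (n - st.2.2) st.2.1 st.2.2
  let v := max (PySem.Int.mod k x) (k - ((n : Int) - (w.2 : Int)) * x)
  let res := if pvCheckA w.1 (PySem.List.pyRange v (k + 1) x)
             then st.1.set (x - 1).toNat true else st.1
  (res, w.1, w.2)

def subsequenceSumAfterCapping (A : List Int) (k : Int) : List Bool :=
  let As := PySem.List.sorted A (fun v => v) false
  let n := As.length
  let mask : Nat := (1 <<< (k + 1).toNat) - 1
  ((PySem.List.pyRange 1 ((n : Int) + 1) 1).foldl (pvStepA As k mask)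
    (List.replicate n false, 1, 0)).1

-- ===== PORT B =====
-- B's m is a Python list indexed in O(1); ported as Array Int (same values, same updates)
-- for s in range(k, a-1, -1): if m[s] == INF and m[s-a] < INF: m[s] = a   (s ≥ a ≥ 0 inside Pre_, so .toNat is exact)
def pvInnerB (k INF : Int) (m : Array Int) (a : Int) : Array Int :=
  (PySem.List.pyRange k (a - 1) (-1)).foldl
    (fun m s => if m.getD s.toNat 0 = INF ∧ m.getD (s - a).toNat 0 < INF then m.setIfInBounds s.toNat a else m) m

-- for a in A: if a > n: break; <inner knapsack loop>
def pvMLoopB (n k INF : Int) : Array Int → List Int → Array Int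
  | m, [] => m
  | m, a :: rest => if n < a then m else pvMLoopB n k INF (pvInnerB k INF m a) rest

-- for _ in range(more+1): if s < 0: break; if m[s] <= x: ok; break; s -= x
def pvQueryB (m : Array Int) (x : Int) : Nat → Int → Bool
  | 0, _ => false
  | fuel + 1, s =>
    if s < 0 then false
    else if m.getD s.toNat 0 ≤ x then true
    else pvQueryB m x fuel (s - x)

def subsequenceSumAfterCapping_alt (A : List Int) (k : Int) : List Bool :=
  let As := PySem.List.sorted A (fun v => v) false
  let n := As.length
  let INF : Int := (n : Int) + 1
  let m0 := Array.replicate (k + 1).toNat INF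
  let m1 := if m0 ≠ #[] then m0.setIfInBounds 0 0 else m0
  let m := pvMLoopB (n : Int) k INF m1 As
  (PySem.List.pyRange 1 ((n : Int) + 1) 1).map (fun x =>
    pvQueryB m x ((As.countP (fun a => decide (x < a))) + 1) k)

-- ===== PRECONDITION & SPEC =====
-- Pre_ excludes exactly the inputs where A raises ValueError: k ≤ -2 (negative shift count in the
-- mask) or a negative element (negative shift of dp); A returns on every input Pre_ admits.
def Pre_subsequenceSumAfterCapping (A : List Int) (k : Int) : Prop :=
  -1 ≤ k ∧ ∀ a ∈ A, 0 ≤ a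
instance (A : List Int) (k : Int) : Decidable (Pre_subsequenceSumAfterCapping A k) := by
  unfold Pre_subsequenceSumAfterCapping; infer_instance

def pvWitness_subsequenceSumAfterCapping : List Int × Int := ([2, 1, 3], 3)

def Spec_subsequenceSumAfterCapping (A : List Int) (k : Int) (out : List Bool) : Prop := out = subsequenceSumAfterCapping_alt A k
instance (A : List Int) (k : Int) (out : List Bool) : Decidable (Spec_subsequenceSumAfterCapping A k out) := by unfold Spec_subsequenceSumAfterCapping; infer_instance

-- ===== CLAIM (what is proved, stated in full; the proofs are below) =====
def Claim_equal_subsequenceSumAfterCapping : Prop := ∀ (A : List Int) (k : Int), Dom_subsequenceSumAfterCapping A k → Pre_subsequenceSumAfterCapping A k → Spec_subsequenceSumAfterCapping A k (subsequenceSumAfterCapping A k)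

-- ===== LEMMAS AND PROOFS =====

-- list-level models of B's array loops (the proofs below work on these)
-- for s in range(k, a-1, -1): if m[s] == INF and m[s-a] < INF: m[s] = a   (s ≥ a ≥ 0 inside Pre_, so .toNat is exact)
def pvInnerBL (k INF : Int) (m : List Int) (a : Int) : List Int :=
  (PySem.List.pyRange k (a - 1) (-1)).foldl
    (fun m s => if m.getD s.toNat 0 = INF ∧ m.getD (s - a).toNat 0 < INF then m.set s.toNat a else m) m

-- for a in A: if a > n: break; <inner knapsack loop>
def pvMLoopBL (n k INF : Int) : List Int → List Int → List Int
  | m, [] => m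
  | m, a :: rest => if n < a then m else pvMLoopBL n k INF (pvInnerBL k INF m a) rest

-- for _ in range(more+1): if s < 0: break; if m[s] <= x: ok; break; s -= x
def pvQueryBL (m : List Int) (x : Int) : Nat → Int → Bool
  | 0, _ => false
  | fuel + 1, s =>
    if s < 0 then false
    else if m.getD s.toNat 0 ≤ x then true
    else pvQueryBL m x fuel (s - x)


lemma pvArrGetD (m : Array Int) (i : Nat) (d : Int) : m.getD i d = m.toList.getD i d := by
  rw [Array.getD, List.getD]
  split
  · rename_i h
    rw [List.getElem?_eq_getElem (by simpa using h)]
    simp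
  · rename_i h
    rw [List.getElem?_eq_none (by simpa using h)]
    rfl

lemma pvArrInner (k INF : Int) (m : Array Int) (a : Int) :
    (pvInnerB k INF m a).toList = pvInnerBL k INF m.toList a := by
  rw [pvInnerB, pvInnerBL]
  generalize (PySem.List.pyRange k (a - 1) (-1)) = L
  induction L generalizing m with
  | nil => rfl
  | cons j rest ih =>
    rw [List.foldl_cons, List.foldl_cons]
    rw [show (if m.toList.getD j.toNat 0 = INF ∧ m.toList.getD (j - a).toNat 0 < INF
          then m.toList.set j.toNat a else m.toList)
        = (if m.getD j.toNat 0 = INF ∧ m.getD (j - a).toNat 0 < INF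
          then m.setIfInBounds j.toNat a else m).toList from ?_]
    · exact ih _
    · rw [pvArrGetD, pvArrGetD]
      split_ifs with hc
      · rw [Array.toList_setIfInBounds]
      · rfl

lemma pvArrMLoop (n k INF : Int) (l : List Int) :
    ∀ m : Array Int, (pvMLoopB n k INF m l).toList = pvMLoopBL n k INF m.toList l := by
  induction l with
  | nil => intro m; rfl
  | cons a rest ih =>
    intro m
    rw [pvMLoopB, pvMLoopBL]
    split_ifs with hc
    · rfl
    · rw [ih, pvArrInner]

lemma pvArrQuery (m : Array Int) (x : Int) :
    ∀ (fuel : Nat) (s : Int), pvQueryB m x fuel s = pvQueryBL m.toList x fuel s := by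
  intro fuel
  induction fuel with
  | zero => intro s; rfl
  | succ f ih =>
    intro s
    rw [pvQueryB, pvQueryBL, pvArrGetD]
    split_ifs <;> first | rfl | exact ih (s - x)

-- A's break-loop over the range is List.any of the bit test
lemma pvCheckA_any (dp : Nat) (js : List Int) :
    pvCheckA dp js = js.any (fun j => dp.testBit j.toNat) := by
  induction js with
  | nil => rfl
  | cons j rest ih =>
    have hb : (dp &&& (1 <<< j.toNat) ≠ 0) ↔ dp.testBit j.toNat = true := by
      rw [Nat.one_shiftLeft, Nat.and_two_pow]
      cases h : dp.testBit j.toNat <;> simp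
    simp only [pvCheckA, List.any_cons]
    split_ifs with h
    · simp [hb.1 h]
    · have hf : dp.testBit j.toNat = false := by
        cases hcb : dp.testBit j.toNat
        · rfl
        · exact absurd (hb.2 hcb) h
      simp [hf, ih]

-- bit s of A's masked shift-or update
lemma pvBitStep (dp : Nat) (t K s : Nat) :
    (dp ||| ((dp <<< t) &&& (2 ^ (K + 1) - 1))).testBit s
    = (dp.testBit s || (decide (t ≤ s) && dp.testBit (s - t) && decide (s < K + 1))) := by
  simp only [Nat.testBit_or, Nat.testBit_and, Nat.testBit_shiftLeft, Nat.testBit_two_pow_sub_one]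

-- the coupling invariant: B's m array vs A's bitmask dp (N = length, k the budget)
def pvRel (N : Nat) (k : Int) (m : List Int) (dp : Nat) : Prop :=
  m.length = k.toNat + 1 ∧ (∀ t : Nat, 0 ≤ m.getD t 0 ∧ m.getD t 0 ≤ (N : Int) + 1) ∧
  ∀ s : Nat, s ≤ k.toNat → dp.testBit s = decide (m.getD s 0 ≤ (N : Int))

-- exact per-index description of one inner knapsack pass (fold over a descending index list)
lemma pvInnerBL_aux (a INF : Int) (ha : 0 ≤ a) (haI : a ≤ INF) (hI : 0 < INF) :
    ∀ (L : List Int) (m : List Int), L.Pairwise (fun p q => q < p) → (∀ j ∈ L, a ≤ j) →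
    (∀ t : Nat, m.getD t 0 ≤ INF) →
    ∀ s : Nat,
    (L.foldl (fun m s' => if m.getD s'.toNat 0 = INF ∧ m.getD (s' - a).toNat 0 < INF then m.set s'.toNat a else m) m).getD s 0
    = if ((s : Int) ∈ L ∧ m.getD s 0 = INF ∧ ¬ m.getD ((s : Int) - a).toNat 0 = INF) then a else m.getD s 0 := by
  intro L
  induction L with
  | nil => intro m _ _ _ s; simp
  | cons j rest ih =>
    intro m hp hmem hbd s
    have hja : a ≤ j := hmem j List.mem_cons_self
    have hj0 : 0 ≤ j := le_trans ha hja
    simp only [List.foldl_cons]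
    set m1 := (if m.getD j.toNat 0 = INF ∧ m.getD (j - a).toNat 0 < INF then m.set j.toNat a else m) with hm1
    have hbd1 : ∀ t : Nat, m1.getD t 0 ≤ INF := by
      intro t
      rw [hm1]
      split_ifs with hc
      · by_cases ht : j.toNat = t
        · subst ht
          have hlen : j.toNat < m.length := by
            by_contra hge
            have : m.getD j.toNat 0 = 0 := List.getD_eq_default _ _ (by omega)
            omega
          simp [List.getD, List.getElem?_set_self hlen, haI]
        · simpa [List.getD, List.getElem?_set_ne ht] using hbd t
      · exact hbd t
    have hrest := ih m1 (List.pairwise_cons.1 hp).2 (fun j' hj' => hmem j' (List.mem_cons_of_mem _ hj')) hbd1 s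
    rw [hrest]
    by_cases hsr : (s : Int) ∈ rest
    · have hsj : (s : Int) < j := (List.pairwise_cons.1 hp).1 _ hsr
      have hne1 : j.toNat ≠ s := by omega
      have hne2 : j.toNat ≠ ((s : Int) - a).toNat := by omega
      have e1 : m1.getD s 0 = m.getD s 0 := by
        rw [hm1]; split_ifs with hc
        · simp [List.getD, List.getElem?_set_ne hne1]
        · rfl
      have e2 : m1.getD ((s : Int) - a).toNat 0 = m.getD ((s : Int) - a).toNat 0 := by
        rw [hm1]; split_ifs with hc
        · simp [List.getD, List.getElem?_set_ne hne2]
        · rfl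
      rw [e1, e2]
      simp [List.mem_cons, hsr]
    · by_cases hsj : (s : Int) = j
      · have hjs : j.toNat = s := by omega
        have hcond : ((s : Int) ∈ j :: rest) := by simp [← hsj]
        by_cases hc : m.getD j.toNat 0 = INF ∧ m.getD (j - a).toNat 0 < INF
        · have hm1s : m1.getD s 0 = a := by
            have hlen : j.toNat < m.length := by
              by_contra hge
              have : m.getD j.toNat 0 = 0 := List.getD_eq_default _ _ (by omega)
              omega
            rw [hm1, if_pos hc, ← hjs]
            simp [List.getD, List.getElem?_set_self hlen]
          rw [if_neg (by tauto), hm1s]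
          rw [if_pos ⟨hcond, by rw [← hjs]; exact hc.1, by rw [show ((s:Int) - a) = (j - a) by omega]; omega⟩]
        · have hm1s : m1 = m := by rw [hm1, if_neg hc]
          rw [if_neg (by tauto), hm1s]
          rw [if_neg ?hne]
          case hne =>
            rintro ⟨-, h1, h2⟩
            apply hc
            constructor
            · rw [hjs]; exact h1
            · rw [show (j - a) = ((s:Int) - a) by omega]
              have := hbd ((s:Int) - a).toNat
              omega
      · have hne1 : j.toNat ≠ s := by omega
        have e1 : m1.getD s 0 = m.getD s 0 := by
          rw [hm1]; split_ifs with hc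
          · simp [List.getD, List.getElem?_set_ne hne1]
          · rfl
        rw [if_neg (by tauto), e1, if_neg ?h2]
        case h2 =>
          rintro ⟨hmem2, -, -⟩
          rcases List.mem_cons.1 hmem2 with h | h
          · exact hsj h
          · exact hsr h

lemma pvInnerBL_getD (k a INF : Int) (ha : 0 ≤ a) (haI : a ≤ INF) (hI : 0 < INF)
    (m : List Int) (hbd : ∀ t : Nat, m.getD t 0 ≤ INF) (s : Nat) :
    (pvInnerBL k INF m a).getD s 0
    = if (a ≤ (s : Int) ∧ (s : Int) ≤ k ∧ m.getD s 0 = INF ∧ ¬ m.getD ((s : Int) - a).toNat 0 = INF)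
      then a else m.getD s 0 := by
  have hpair : (PySem.List.pyRange k (a - 1) (-1)).Pairwise (fun p q => q < p) := by
    rw [PySem.List.pyRange_neg_one]
    exact (List.pairwise_map).2 ((List.pairwise_lt_range).imp (by intro u v h; omega))
  have hmem : ∀ j ∈ PySem.List.pyRange k (a - 1) (-1), a ≤ j := by
    intro j hj
    have := (PySem.List.mem_pyRange_neg_one).1 hj
    omega
  rw [pvInnerBL, pvInnerBL_aux a INF ha haI hI _ m hpair hmem hbd s]
  apply if_congr _ rfl rfl
  simp only [PySem.List.mem_pyRange_neg_one]
  constructor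
  · rintro ⟨⟨u, v⟩, p, q⟩; exact ⟨by omega, v, p, q⟩
  · rintro ⟨u, v, p, q⟩; exact ⟨⟨by omega, v⟩, p, q⟩

lemma pvInnerBL_length (k INF : Int) (m : List Int) (a : Int) :
    (pvInnerBL k INF m a).length = m.length := by
  unfold pvInnerBL
  generalize (PySem.List.pyRange k (a - 1) (-1)) = L
  induction L generalizing m with
  | nil => rfl
  | cons j rest ih =>
    simp only [List.foldl_cons]
    split_ifs with h
    · rw [ih]; simp
    · exact ih m

-- one element step preserves the coupling invariant
lemma pvRelStep (N : Nat) (k : Int) (hk : 0 ≤ k) (m : List Int) (dp : Nat) (a : Int)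
    (ha : 0 ≤ a) (haN : a ≤ (N : Int)) (h : pvRel N k m dp) :
    pvRel N k (pvInnerBL k ((N : Int) + 1) m a)
      (dp ||| ((dp <<< a.toNat) &&& (2 ^ (k.toNat + 1) - 1))) := by
  obtain ⟨hlen, hbd, hbit⟩ := h
  have hbd' : ∀ t : Nat, m.getD t 0 ≤ (N : Int) + 1 := fun t => (hbd t).2
  have hI : (0 : Int) < (N : Int) + 1 := by positivity
  have haI : a ≤ (N : Int) + 1 := by omega
  have hg := fun s => pvInnerBL_getD k a ((N : Int) + 1) ha haI hI m hbd' s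
  refine ⟨by rw [pvInnerBL_length]; exact hlen, ?_, ?_⟩
  · intro t
    rw [hg t]
    split_ifs with hc
    · omega
    · exact hbd t
  · intro s hs
    rw [pvBitStep, hg s]
    have hsk : (s : Int) ≤ k := by omega
    have hdec : decide (s < k.toNat + 1) = true := by simp; omega
    have hbs := hbit s hs
    have heq : ((s : Int) - a).toNat = s - a.toNat := by omega
    have hbs' := hbit (s - a.toNat) (by omega)
    by_cases hms : m.getD s 0 ≤ (N : Int)
    · have hne : ¬ m.getD s 0 = (N : Int) + 1 := by omega
      rw [if_neg (by tauto)]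
      have hb1 : dp.testBit s = true := by rw [hbs]; exact decide_eq_true hms
      rw [hb1, Bool.true_or]
      exact (decide_eq_true hms).symm
    · have hmeq : m.getD s 0 = (N : Int) + 1 := by have := hbd s; omega
      have hb0 : dp.testBit s = false := by rw [hbs]; exact decide_eq_false hms
      rw [hb0, Bool.false_or, hdec, Bool.and_true]
      by_cases hca : a ≤ (s : Int)
      · by_cases hcsub : ¬ m.getD ((s : Int) - a).toNat 0 = (N : Int) + 1
        · rw [if_pos ⟨hca, hsk, hmeq, hcsub⟩]
          have hsub : m.getD (s - a.toNat) 0 ≤ (N : Int) := by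
            have := hbd (s - a.toNat); rw [heq] at hcsub; omega
          have hbt : dp.testBit (s - a.toNat) = true := by rw [hbs']; exact decide_eq_true hsub
          have hfa : decide (a.toNat ≤ s) = true := decide_eq_true (by omega)
          rw [hbt, hfa, Bool.true_and]
          exact (decide_eq_true haN).symm
        · rw [if_neg (by tauto)]
          have hsub : ¬ m.getD (s - a.toNat) 0 ≤ (N : Int) := by
            rw [heq] at hcsub; omega
          have hbt : dp.testBit (s - a.toNat) = false := by rw [hbs']; exact decide_eq_false hsub
          rw [hbt, Bool.and_false]
          exact (decide_eq_false (by omega)).symm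
      · rw [if_neg (by tauto)]
        have hfa : decide (a.toNat ≤ s) = false := decide_eq_false (by omega)
        rw [hfa, Bool.false_and]
        exact (decide_eq_false (by omega)).symm


-- sorted-prefix characterisation of countP (· ≤ x)
lemma pvCntSpec (As : List Int) (hs : As.Pairwise (· ≤ ·)) (x : Int) :
    (∀ a ∈ As.take (As.countP (fun a => decide (a ≤ x))), a ≤ x) ∧
    (∀ a ∈ As.drop (As.countP (fun a => decide (a ≤ x))), x < a) := by
  induction As with
  | nil => simp
  | cons b t ih =>
    obtain ⟨hbt, hpt⟩ := List.pairwise_cons.1 hs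
    obtain ⟨ih1, ih2⟩ := ih hpt
    by_cases hb : b ≤ x
    · rw [List.countP_cons, if_pos (by simpa using hb)]
      constructor
      · intro a ha
        rw [List.take_succ_cons] at ha
        rcases List.mem_cons.1 ha with h | h
        · omega
        · exact ih1 a h
      · intro a ha
        rw [List.drop_succ_cons] at ha
        exact ih2 a ha
    · have hz : List.countP (fun a => decide (a ≤ x)) t = 0 := by
        rw [List.countP_eq_zero]
        intro a ha
        have := hbt a ha
        simp; omega
      rw [List.countP_cons, if_neg (by simpa using hb), hz]
      constructor
      · intro a ha; simp at ha
      · intro a ha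
        simp only [Nat.add_zero, List.drop_zero] at ha
        rcases List.mem_cons.1 ha with h | h
        · omega
        · have := hbt a h; omega

lemma pvCntTakeWhile (As : List Int) (hs : As.Pairwise (· ≤ ·)) (x : Int) :
    As.takeWhile (fun a => decide (a ≤ x)) = As.take (As.countP (fun a => decide (a ≤ x))) := by
  induction As with
  | nil => simp
  | cons b t ih =>
    obtain ⟨hbt, hpt⟩ := List.pairwise_cons.1 hs
    by_cases hb : b ≤ x
    · rw [List.countP_cons, if_pos (by simpa using hb)]
      rw [List.takeWhile_cons, if_pos (by simpa using hb)]
      rw [List.take_succ_cons, ih hpt]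
    · have hz : List.countP (fun a => decide (a ≤ x)) t = 0 := by
        rw [List.countP_eq_zero]
        intro a ha
        have := hbt a ha
        simp; omega
      rw [List.countP_cons, if_neg (by simpa using hb), hz]
      rw [List.takeWhile_cons, if_neg (by simpa using hb)]
      simp

-- the while loop lands exactly on countP (· ≤ x) and keeps dp coupled to the m-prefix fold
lemma pvWhileSync (As : List Int) (hs : As.Pairwise (· ≤ ·)) (hnn : ∀ a ∈ As, 0 ≤ a)
    (k x : Int) (hk : 0 ≤ k) (hx : x ≤ (As.length : Int)) :
    ∀ (fuel i : Nat) (dp : Nat) (m : List Int), As.length - i ≤ fuel →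
      i ≤ As.countP (fun a => decide (a ≤ x)) → pvRel As.length k m dp →
      (pvWhileA As x (2 ^ (k.toNat + 1) - 1) fuel dp i).2 = As.countP (fun a => decide (a ≤ x)) ∧
      pvRel As.length k
        (((As.take (As.countP (fun a => decide (a ≤ x)))).drop i).foldl
          (pvInnerBL k ((As.length : Int) + 1)) m)
        (pvWhileA As x (2 ^ (k.toNat + 1) - 1) fuel dp i).1 := by
  have hcl : As.countP (fun a => decide (a ≤ x)) ≤ As.length := List.countP_le_length
  have hlentake : (As.take (As.countP (fun a => decide (a ≤ x)))).length
      = As.countP (fun a => decide (a ≤ x)) := by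
    rw [List.length_take]; omega
  intro fuel
  induction fuel with
  | zero =>
    intro i dp m hfuel hic hrel
    have hie : i = As.countP (fun a => decide (a ≤ x)) := by omega
    constructor
    · simpa [pvWhileA] using hie
    · rw [List.drop_eq_nil_of_le (by omega)]
      simpa [pvWhileA] using hrel
  | succ f ih =>
    intro i dp m hfuel hic hrel
    by_cases hcnt : i < As.countP (fun a => decide (a ≤ x))
    · have hi : i < As.length := by omega
      have hitake : i < (As.take (As.countP (fun a => decide (a ≤ x)))).length := by omega
      have hgd : As.getD i 0 = As[i] := List.getD_eq_getElem As 0 hi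
      have hax : As[i] ≤ x := by
        have := (pvCntSpec As hs x).1 ((As.take (As.countP (fun a => decide (a ≤ x))))[i]'hitake)
          (List.getElem_mem hitake)
        rwa [List.getElem_take] at this
      have ha0 : 0 ≤ As[i] := hnn _ (List.getElem_mem hi)
      have hcond : (decide (i < As.length) && decide (As.getD i 0 ≤ x)) = true := by
        simp [hi, hax]
      rw [pvWhileA, if_pos hcond]
      have hstep := pvRelStep As.length k hk m dp (As.getD i 0) (by rw [hgd]; exact ha0)
        (by rw [hgd]; omega) hrel
      have hrec := ih (i + 1) _ _ (by omega) (by omega) hstep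
      refine ⟨hrec.1, ?_⟩
      rw [List.drop_eq_getElem_cons hitake, List.foldl_cons, List.getElem_take, ← hgd]
      exact hrec.2
    · have hie : i = As.countP (fun a => decide (a ≤ x)) := by omega
      have hcond : (decide (i < As.length) && decide (As.getD i 0 ≤ x)) = false := by
        by_cases hil : i < As.length
        · have hgd : As.getD i 0 = As[i] := List.getD_eq_getElem As 0 hil
          have hgt : x < As[i] := by
            have h0 : (As.drop (As.countP (fun a => decide (a ≤ x))))[0]'(by rw [List.length_drop]; omega)
                = As[i] := by
              rw [List.getElem_drop]; congr 1; omega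
            have hlend : 0 < (As.drop (As.countP (fun a => decide (a ≤ x)))).length := by
              rw [List.length_drop]; omega
            have := (pvCntSpec As hs x).2 _ (List.getElem_mem hlend)
            rwa [h0] at this
          have hnle : ¬ (As.getD i 0 ≤ x) := by rw [hgd]; omega
          rw [decide_eq_false hnle, Bool.and_false]
        · rw [decide_eq_false hil, Bool.false_and]
      rw [pvWhileA, if_neg (by rw [hcond]; exact Bool.false_ne_true)]
      constructor
      · exact hie
      · rw [List.drop_eq_nil_of_le (by omega)]
        exact hrel


-- values set while folding elements ≤ x stay ≤ x (and stay bounded)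
lemma pvFoldVal (N : Nat) (k x : Int) (l : List Int) (hl : ∀ a ∈ l, 0 ≤ a ∧ a ≤ x)
    (hx : x ≤ (N : Int)) :
    ∀ m : List Int, (∀ t : Nat, m.getD t 0 ≤ (N : Int) + 1) →
      (∀ t : Nat, m.getD t 0 ≤ (N : Int) → m.getD t 0 ≤ x) →
      (∀ t : Nat, (l.foldl (pvInnerBL k ((N : Int) + 1)) m).getD t 0 ≤ (N : Int) + 1) ∧
      (∀ t : Nat, (l.foldl (pvInnerBL k ((N : Int) + 1)) m).getD t 0 ≤ (N : Int) →
        (l.foldl (pvInnerBL k ((N : Int) + 1)) m).getD t 0 ≤ x) := by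
  induction l with
  | nil => intro m h1 h2; exact ⟨h1, h2⟩
  | cons a t ih =>
    intro m h1 h2
    obtain ⟨ha0, hax⟩ := hl a List.mem_cons_self
    have hg := fun s => pvInnerBL_getD k a ((N : Int) + 1) ha0 (by omega) (by positivity) m h1 s
    simp only [List.foldl_cons]
    refine ih (fun b hb => hl b (List.mem_cons_of_mem _ hb)) _ ?_ ?_
    · intro s; rw [hg s]; split_ifs with hc
      · omega
      · exact h1 s
    · intro s; rw [hg s]; split_ifs with hc
      · intro _; exact hax
      · exact h2 s

-- folding elements > x never changes whether an entry is ≤ x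
lemma pvFoldSuffix (N : Nat) (k x : Int) (l : List Int) (hl : ∀ a ∈ l, 0 ≤ a ∧ x < a ∧ a ≤ (N : Int))
    (hx : x ≤ (N : Int)) :
    ∀ m : List Int, (∀ t : Nat, m.getD t 0 ≤ (N : Int) + 1) →
      ∀ t : Nat, ((l.foldl (pvInnerBL k ((N : Int) + 1)) m).getD t 0 ≤ x ↔ m.getD t 0 ≤ x) := by
  induction l with
  | nil => intro m _ t; exact Iff.rfl
  | cons a t ih =>
    intro m h1 s
    obtain ⟨ha0, hxa, haN⟩ := hl a List.mem_cons_self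
    have hg := fun s => pvInnerBL_getD k a ((N : Int) + 1) ha0 (by omega) (by positivity) m h1 s
    have h1' : ∀ t : Nat, (pvInnerBL k ((N : Int) + 1) m a).getD t 0 ≤ (N : Int) + 1 := by
      intro u; rw [hg u]; split_ifs with hc
      · omega
      · exact h1 u
    simp only [List.foldl_cons]
    rw [ih (fun b hb => hl b (List.mem_cons_of_mem _ hb)) _ h1' s, hg s]
    split_ifs with hc
    · constructor
      · intro h; omega
      · intro h; omega
    · exact Iff.rfl

-- B's break-at->n loop is the fold over the takeWhile prefix
lemma pvMLoopBL_eq (n k INF : Int) :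
    ∀ (l m : List Int), pvMLoopBL n k INF m l
      = (l.takeWhile (fun a => decide (a ≤ n))).foldl (pvInnerBL k INF) m := by
  intro l
  induction l with
  | nil => intro m; rfl
  | cons a t ih =>
    intro m
    rw [pvMLoopBL, List.takeWhile_cons]
    by_cases hc : n < a
    · rw [if_pos hc, if_neg (by simp; omega)]
      rfl
    · rw [if_neg hc, if_pos (by simp; omega), List.foldl_cons]
      exact ih _

-- B's downward query walk as an any over range
lemma pvQueryBL_eq (m : List Int) (x : Int) (hx : 1 ≤ x) :
    ∀ (fuel : Nat) (s : Int),
      pvQueryBL m x fuel s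
      = (List.range fuel).any
          (fun t => decide (0 ≤ s - (t : Int) * x) && decide (m.getD (s - (t : Int) * x).toNat 0 ≤ x)) := by
  intro fuel
  induction fuel with
  | zero => intro s; rfl
  | succ f ih =>
    intro s
    rw [pvQueryBL, List.range_succ_eq_map, List.any_cons, List.any_map]
    have harg : ∀ tn : Nat, s - ((tn : Int) + 1) * x = (s - x) - (tn : Int) * x := by
      intro tn; ring
    by_cases hneg : s < 0
    · rw [if_pos hneg]
      have h0 : (decide (0 ≤ s - ((0:Nat) : Int) * x) && decide (m.getD (s - ((0:Nat) : Int) * x).toNat 0 ≤ x)) = false := by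
        have : ¬ (0 ≤ s - ((0:Nat) : Int) * x) := by push_cast; omega
        rw [decide_eq_false this, Bool.false_and]
      rw [h0, Bool.false_or]
      symm
      rw [List.any_eq_false]
      intro t _
      simp only [Function.comp]
      have : ¬ (0 ≤ s - ((t.succ : Nat) : Int) * x) := by
        push_cast
        have : 0 ≤ (t : Int) * x := by positivity
        nlinarith
      rw [decide_eq_false this, Bool.false_and]
      simp
    · rw [if_neg hneg]
      by_cases hit : m.getD s.toNat 0 ≤ x
      · rw [if_pos hit]
        have h0 : (decide (0 ≤ s - ((0:Nat) : Int) * x) && decide (m.getD (s - ((0:Nat) : Int) * x).toNat 0 ≤ x)) = true := by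
          push_cast
          simp only [zero_mul, sub_zero]
          rw [decide_eq_true (by omega : (0:Int) ≤ s), decide_eq_true hit]
          rfl
        rw [h0, Bool.true_or]
      · rw [if_neg hit, ih (s - x)]
        have h0 : (decide (0 ≤ s - ((0:Nat) : Int) * x) && decide (m.getD (s - ((0:Nat) : Int) * x).toNat 0 ≤ x)) = false := by
          push_cast
          simp only [zero_mul, sub_zero]
          rw [decide_eq_false hit, Bool.and_false]
        rw [h0, Bool.false_or]
        apply List.any_congr rfl
        intro t
        simp only [Function.comp]
        have : s - ((t.succ : Nat) : Int) * x = (s - x) - (t : Int) * x := by push_cast; ring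
        rw [this]


-- A's upward range scan and B's downward walk test the same sums
lemma pvRangeAnyEq (m : List Int) (k x : Int) (hx : 1 ≤ x) (g : Nat) :
    (PySem.List.pyRange (max (PySem.Int.mod k x) (k - (g : Int) * x)) (k + 1) x).any
      (fun j => decide (m.getD j.toNat 0 ≤ x))
    = (List.range (g + 1)).any
        (fun t => decide (0 ≤ k - (t : Int) * x) && decide (m.getD (k - (t : Int) * x).toNat 0 ≤ x)) := by
  have hxpos : (0 : Int) < x := by omega
  set r := PySem.Int.mod k x with hrdef
  have hrem : r = k % x := PySem.Int.mod_eq_emod_of_pos hxpos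
  have hr0 : 0 ≤ r := by rw [hrem]; exact Int.emod_nonneg k (by omega)
  have hrlt : r < x := by rw [hrem]; exact Int.emod_lt_of_pos k hxpos
  have hdvd_kr : x ∣ k - r := by
    rw [hrem, Int.emod_def]; ring_nf; exact Dvd.intro _ rfl
  have hdvd_kv : x ∣ k - max r (k - (g : Int) * x) := by
    rcases max_choice r (k - (g : Int) * x) with h | h <;> rw [h]
    · exact hdvd_kr
    · simp
  rw [Bool.eq_iff_iff, List.any_eq_true, List.any_eq_true]
  constructor
  · rintro ⟨j, hjmem, hPj⟩
    obtain ⟨hjlo, hjhi, hjdvd⟩ := (PySem.List.mem_pyRange_iff_of_pos hxpos j).1 hjmem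
    have hdvd_kj : x ∣ k - j := by
      have : k - j = (k - max r (k - (g : Int) * x)) - (j - max r (k - (g : Int) * x)) := by ring
      rw [this]; exact dvd_sub hdvd_kv hjdvd
    obtain ⟨t', ht'⟩ := hdvd_kj
    have ht'0 : 0 ≤ t' := by nlinarith
    have ht'g : t' ≤ (g : Int) := by
      have h1 : k - (g : Int) * x ≤ j := le_trans (le_max_right _ _) hjlo
      nlinarith
    refine ⟨t'.toNat, List.mem_range.2 (by omega), ?_⟩
    have hjt : k - (t'.toNat : Int) * x = j := by
      rw [Int.toNat_of_nonneg ht'0]; nlinarith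
    rw [hjt]
    have hj0 : 0 ≤ j := le_trans hr0 (le_trans (le_max_left _ _) hjlo)
    rw [decide_eq_true hj0, Bool.true_and]
    exact hPj
  · rintro ⟨t, htmem, hcond⟩
    have htg : (t : Int) ≤ (g : Int) := by
      have := List.mem_range.1 htmem; exact_mod_cast Nat.lt_succ_iff.1 this
    rw [Bool.and_eq_true, decide_eq_true_eq, decide_eq_true_eq] at hcond
    obtain ⟨hj0, hPj⟩ := hcond
    set j := k - (t : Int) * x with hjdef
    have hjr : j % x = r := by
      rw [hrem, hjdef, show k - (t : Int) * x = k + x * (-(t:Int)) by ring, Int.add_mul_emod_self_left]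
    have hrj : r ≤ j := by
      have hdm := Int.emod_add_mul_ediv j x
      have hdnn : 0 ≤ j / x := Int.ediv_nonneg hj0 (by omega)
      nlinarith [hjr]
    have hjv : max r (k - (g : Int) * x) ≤ j := by
      apply max_le hrj
      have : (t : Int) * x ≤ (g : Int) * x := mul_le_mul_of_nonneg_right htg (by omega)
      omega
    refine ⟨j, (PySem.List.mem_pyRange_iff_of_pos hxpos j).2 ⟨hjv, by nlinarith, ?_⟩, decide_eq_true hPj⟩
    have : j - max r (k - (g : Int) * x) = (k - max r (k - (g : Int) * x)) - x * (t : Int) := by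
      rw [hjdef]; ring
    rw [this]
    exact dvd_sub hdvd_kv (Dvd.intro _ rfl)


lemma pvSet_append (u v : List Bool) (y : Bool) :
    (u ++ v).set u.length y = u ++ v.set 0 y := by
  induction u with
  | nil => rfl
  | cons b t ih => simp [ih]

-- the outer fold over caps, main case k ≥ 0
lemma pvOuter (As : List Int) (hs : As.Pairwise (· ≤ ·)) (hnn : ∀ a ∈ As, 0 ≤ a)
    (k : Int) (hk : 0 ≤ k) :
    ∀ (c : Nat) (res : List Bool) (dp : Nat) (i : Nat),
      res.length + c = As.length →
      i ≤ As.countP (fun a => decide (a ≤ (res.length : Int))) →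
      pvRel As.length k
        ((As.take i).foldl (pvInnerBL k ((As.length : Int) + 1))
          ((List.replicate (k.toNat + 1) ((As.length : Int) + 1)).set 0 0)) dp →
      ((PySem.List.pyRange ((res.length : Int) + 1) ((As.length : Int) + 1) 1).foldl
          (pvStepA As k (2 ^ (k.toNat + 1) - 1)) (res ++ List.replicate c false, dp, i)).1
      = res ++ (PySem.List.pyRange ((res.length : Int) + 1) ((As.length : Int) + 1) 1).map
          (fun x => pvQueryBL
            (pvMLoopBL (As.length : Int) k ((As.length : Int) + 1)
              ((List.replicate (k.toNat + 1) ((As.length : Int) + 1)).set 0 0) As)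
            x ((As.countP (fun a => decide (x < a))) + 1) k) := by
  intro c
  induction c with
  | zero =>
    intro res dp i hlen hic hrel
    rw [PySem.List.pyRange_one_eq_nil (by omega)]
    simp
  | succ c ih =>
    intro res dp i hlen hic hrel
    have hLlt : res.length < As.length := by omega
    rw [PySem.List.pyRange_one_cons (by omega), List.foldl_cons, List.map_cons]
    set x : Int := (res.length : Int) + 1 with hxdef
    have hx1 : (1:Int) ≤ x := by omega
    have hxN : x ≤ (As.length : Int) := by omega
    have hmono : As.countP (fun a => decide (a ≤ (res.length : Int)))
        ≤ As.countP (fun a => decide (a ≤ x)) := by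
      apply List.countP_mono_left
      intro a _ h
      simp only [decide_eq_true_eq] at h ⊢
      omega
    have hws := pvWhileSync As hs hnn k x hk hxN (As.length - i) i dp _ (by omega) (by omega) hrel
    simp only [pvStepA]
    set w := pvWhileA As x (2 ^ (k.toNat + 1) - 1) (As.length - i) dp i with hw
    set i' := As.countP (fun a => decide (a ≤ x)) with hi'
    have hi'le : i' ≤ As.length := List.countP_le_length
    have hii' : i ≤ i' := by omega
    set m1 := (List.replicate (k.toNat + 1) ((As.length : Int) + 1)).set 0 0 with hm1
    have hsplit : As.take i' = As.take i ++ (As.take i').drop i := by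
      conv_lhs => rw [← List.take_append_drop i (As.take i')]
      rw [List.take_take, min_eq_left hii']
    have hrel' : pvRel As.length k ((As.take i').foldl (pvInnerBL k ((As.length : Int) + 1)) m1) w.1 := by
      rw [hsplit, List.foldl_append]
      exact hws.2
    set mP := (As.take i').foldl (pvInnerBL k ((As.length : Int) + 1)) m1 with hmP
    -- identify B's final m with the fold over the full ≤ n prefix
    set cN := As.countP (fun a => decide (a ≤ (As.length : Int))) with hcN
    have hi'cN : i' ≤ cN := by
      apply List.countP_mono_left
      intro a _ h
      simp only [decide_eq_true_eq] at h ⊢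
      omega
    have hsplit2 : As.take cN = As.take i' ++ (As.take cN).drop i' := by
      conv_lhs => rw [← List.take_append_drop i' (As.take cN)]
      rw [List.take_take, min_eq_left hi'cN]
    have hmfin2 : pvMLoopBL (As.length : Int) k ((As.length : Int) + 1) m1 As
        = ((As.take cN).drop i').foldl (pvInnerBL k ((As.length : Int) + 1)) mP := by
      rw [pvMLoopBL_eq, pvCntTakeWhile As hs, ← hcN]
      conv_lhs => rw [hsplit2]
      rw [List.foldl_append, ← hmP]
    set mF := pvMLoopBL (As.length : Int) k ((As.length : Int) + 1) m1 As with hmF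
    have hseg2 : ∀ a ∈ (As.take cN).drop i', 0 ≤ a ∧ x < a ∧ a ≤ (As.length : Int) := by
      intro a ha
      have h1 : a ∈ As.drop i' := by
        rw [List.drop_take] at ha
        exact List.mem_of_mem_take ha
      have h2 : a ∈ As.take cN := List.mem_of_mem_drop ha
      exact ⟨hnn a (List.mem_of_mem_drop h1), (pvCntSpec As hs x).2 a h1,
        (pvCntSpec As hs (As.length : Int)).1 a h2⟩
    have hsuffix := pvFoldSuffix As.length k x _ hseg2 hxN mP (fun t => (hrel'.2.1 t).2)
    have htake : ∀ a ∈ As.take i', 0 ≤ a ∧ a ≤ x := fun a ha =>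
      ⟨hnn a (List.mem_of_mem_take ha), (pvCntSpec As hs x).1 a ha⟩
    have hm1g : ∀ t : Nat, m1.getD t 0 = if t = 0 then 0 else
        if t < k.toNat + 1 then (As.length : Int) + 1 else 0 := by
      intro t
      by_cases t0 : t = 0
      · subst t0
        rw [if_pos rfl, hm1]
        simp [List.getD, List.length_replicate]
      · rw [if_neg t0, hm1]
        have : (0 : Nat) ≠ t := fun h => t0 h.symm
        simp only [List.getD, List.getElem?_set_ne this, List.getElem?_replicate]
        by_cases ht : t < k.toNat + 1
        · simp [ht]
        · simp [ht]
    have hval := pvFoldVal As.length k x (As.take i') htake hxN m1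
      (by intro t; rw [hm1g t]; split_ifs <;> omega)
      (by intro t; rw [hm1g t]; split_ifs <;> omega)
    set g : Nat := As.length - i' with hg
    have hcntgt : As.countP (fun a => decide (x < a)) = g := by
      have hsum := List.length_eq_countP_add_countP (fun a => decide (a ≤ x)) (l := As)
      have hcong : As.countP (fun a => decide (x < a))
          = As.countP (fun a => decide ¬ (decide (a ≤ x)) = true) := by
        apply List.countP_congr
        intro a _
        simp only [decide_eq_true_eq, decide_not, Bool.not_eq_true', decide_eq_false_iff_not]
        constructor
        · intro h; simp; omega
        · intro h; simp at h; omega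
      omega
    have hCheck : pvCheckA w.1 (PySem.List.pyRange
          (max (PySem.Int.mod k x) (k - ((As.length : Int) - (w.2 : Int)) * x)) (k + 1) x)
        = pvQueryBL mF x (As.countP (fun a => decide (x < a)) + 1) k := by
      rw [pvCheckA_any]
      rw [PySem.List.any_congr_mem (g := fun j => decide (mF.getD j.toNat 0 ≤ x)) ?hpoint]
      case hpoint =>
        intro j hj
        obtain ⟨hjlo, hjhi, -⟩ := (PySem.List.mem_pyRange_iff_of_pos (by omega) j).1 hj
        have hj0 : 0 ≤ j := by
          have := PySem.Int.mod_nonneg k (show (0:Int) < x by omega)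
          have := le_max_left (PySem.Int.mod k x) (k - ((As.length : Int) - (w.2 : Int)) * x)
          omega
        have hjk : j.toNat ≤ k.toNat := by omega
        rw [hrel'.2.2 j.toNat hjk]
        have hiff : mP.getD j.toNat 0 ≤ (As.length : Int) ↔ mF.getD j.toNat 0 ≤ x := by
          rw [hmfin2, hsuffix j.toNat]
          constructor
          · intro h; exact hval.2 j.toNat h
          · intro h; omega
        rw [decide_eq_decide.2 hiff]
      rw [hws.1]
      have hcast : ((As.length : Int) - (i' : Int)) = (g : Int) := by omega
      rw [hcast, pvRangeAnyEq mF k x hx1 g, ← pvQueryBL_eq mF x hx1 (g + 1) k, hcntgt]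
    rw [hws.1] at hCheck ⊢
    rw [hCheck]
    have hxm1 : (x - 1).toNat = res.length := by omega
    cases hb : pvQueryBL mF x (As.countP (fun a => decide (x < a)) + 1) k with
    | true =>
      rw [if_pos rfl, hxm1]
      have hset : (res ++ List.replicate (c + 1) false).set res.length true
          = (res ++ [true]) ++ List.replicate c false := by
        rw [show List.replicate (c + 1) false = false :: List.replicate c false from rfl,
          pvSet_append]
        simp
      rw [hset]
      have := ih (res ++ [true]) w.1 i' (by simp; omega)
        (by simpa using le_of_eq rfl) (by rw [← hmP]; exact hrel')
      simp only [List.length_append, List.length_cons, List.length_nil] at this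
      rw [show ((res.length + 1 : Nat) : Int) + 1 = x + 1 by push_cast; omega] at this
      rw [this]
      simp [hxdef]
    | false =>
      rw [if_neg (by simp)]
      have hpad : res ++ List.replicate (c + 1) false
          = (res ++ [false]) ++ List.replicate c false := by
        rw [show List.replicate (c + 1) false = false :: List.replicate c false from rfl]
        simp
      rw [hpad]
      have := ih (res ++ [false]) w.1 i' (by simp; omega)
        (by simpa using le_of_eq rfl) (by rw [← hmP]; exact hrel')
      simp only [List.length_append, List.length_cons, List.length_nil] at this
      rw [show ((res.length + 1 : Nat) : Int) + 1 = x + 1 by push_cast; omega] at this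
      rw [this]
      simp [hxdef]

-- the k = -1 case: the check range is empty, so A never sets a flag
lemma pvStepANeg (As : List Int) (mask : Nat) :
    ∀ (L : List Int), (∀ x ∈ L, 1 ≤ x) → ∀ st : List Bool × Nat × Nat,
      ((L.foldl (pvStepA As (-1) mask) st).1 = st.1) := by
  intro L
  induction L with
  | nil => intro _ st; rfl
  | cons x rest ih =>
    intro hL st
    have hx : (1:Int) ≤ x := hL x List.mem_cons_self
    rw [List.foldl_cons]
    rw [ih (fun y hy => hL y (List.mem_cons_of_mem _ hy))]
    show (if pvCheckA _ (PySem.List.pyRange _ ((-1) + 1) x) = true then _ else st.1) = st.1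
    rw [if_neg ?hfalse]
    case hfalse =>
      rw [pvCheckA_any]
      simp only [Bool.not_eq_true, List.any_eq_false]
      intro j hj
      exfalso
      have hm := (PySem.List.mem_pyRange_iff_of_pos (by omega) j).1 hj
      have hv : 0 ≤ max (PySem.Int.mod (-1) x) ((-1) - ((As.length : Int) - ((pvWhileA As x mask (As.length - st.2.2) st.2.1 st.2.2).2 : Int)) * x) := by
        have := PySem.Int.mod_nonneg (-1) (show (0:Int) < x by omega)
        exact le_trans this (le_max_left _ _)
      omega


-- ===== VERDICT (by name: the statement is the Claim_ definition above) =====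
theorem subsequenceSumAfterCapping_spec : Claim_equal_subsequenceSumAfterCapping := by
  intro A k _ hpre
  obtain ⟨hk1, hnnA⟩ := hpre
  unfold Spec_subsequenceSumAfterCapping subsequenceSumAfterCapping subsequenceSumAfterCapping_alt
  have hs : (PySem.List.sorted A (fun v => v) false).Pairwise (· ≤ ·) :=
    PySem.List.sorted_pairwise A (fun v => v)
  have hnn : ∀ a ∈ PySem.List.sorted A (fun v => v) false, 0 ≤ a := by
    intro a ha
    exact hnnA a ((PySem.List.mem_sorted A (fun v => v) false a).1 ha)
  set As := PySem.List.sorted A (fun v => v) false with hAs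
  by_cases hk : 0 ≤ k
  · -- main case k ≥ 0
    have hmask : (1 <<< (k + 1).toNat) - 1 = 2 ^ (k.toNat + 1) - 1 := by
      rw [Nat.one_shiftLeft, show (k + 1).toNat = k.toNat + 1 by omega]
    have hm0 : Array.replicate (k + 1).toNat ((As.length : Int) + 1) ≠ #[] := by
      intro h
      have := congrArg Array.toList h
      rw [Array.toList_replicate] at this
      simp at this
      omega
    have hm1g : ∀ t : Nat,
        ((List.replicate (k.toNat + 1) ((As.length : Int) + 1)).set 0 0).getD t 0
        = if t = 0 then 0 else if t < k.toNat + 1 then (As.length : Int) + 1 else 0 := by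
      intro t
      by_cases t0 : t = 0
      · subst t0
        rw [if_pos rfl]
        simp [List.getD, List.length_replicate]
      · rw [if_neg t0]
        have hne : (0 : Nat) ≠ t := fun h => t0 h.symm
        simp only [List.getD, List.getElem?_set_ne hne, List.getElem?_replicate]
        by_cases ht : t < k.toNat + 1
        · simp [ht]
        · simp [ht]
    have hrel0 : pvRel As.length k
        ((List.replicate (k.toNat + 1) ((As.length : Int) + 1)).set 0 0) 1 := by
      refine ⟨by simp, ?_, ?_⟩
      · intro t
        rw [hm1g t]
        split_ifs <;> constructor <;> omega
      · intro s hsK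
        rw [hm1g s]
        cases s with
        | zero =>
          rw [if_pos rfl]
          have : (0 : Int) ≤ (As.length : Int) := by positivity
          simp [this]
        | succ u =>
          rw [if_neg (by omega), if_pos (by omega)]
          have h1 : Nat.testBit 1 (u + 1) = false := by
            simp [Nat.testBit_succ]
          rw [h1]
          symm
          rw [decide_eq_false_iff_not]
          omega
    have hout := pvOuter As hs hnn k hk As.length [] 1 0 (by simp) (Nat.zero_le _)
      (by simpa using hrel0)
    simp only [List.length_nil, Nat.cast_zero, zero_add, List.nil_append] at hout
    show (List.foldl (pvStepA As k ((1 <<< (k + 1).toNat) - 1))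
        (List.replicate As.length false, 1, 0) (PySem.List.pyRange 1 ((As.length : Int) + 1))).1
      = List.map (fun x => pvQueryB
          (pvMLoopB (As.length : Int) k ((As.length : Int) + 1)
            (if Array.replicate (k + 1).toNat ((As.length : Int) + 1) ≠ #[]
             then (Array.replicate (k + 1).toNat ((As.length : Int) + 1)).setIfInBounds 0 0
             else Array.replicate (k + 1).toNat ((As.length : Int) + 1)) As)
          x (List.countP (fun a => decide (x < a)) As + 1) k)
        (PySem.List.pyRange 1 ((As.length : Int) + 1))
    rw [if_pos hm0, hmask]
    simp only [pvArrQuery, pvArrMLoop, Array.toList_setIfInBounds, Array.toList_replicate]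
    rw [show (k + 1).toNat = k.toNat + 1 by omega]
    exact hout
  · -- k = -1
    have hkm : k = -1 := by omega
    subst hkm
    have hA : ((PySem.List.pyRange 1 ((As.length : Int) + 1) 1).foldl
        (pvStepA As (-1) ((1 <<< ((-1 : Int) + 1).toNat) - 1))
        (List.replicate As.length false, 1, 0)).1 = List.replicate As.length false := by
      apply pvStepANeg
      intro x hx
      exact ((PySem.List.mem_pyRange_one).1 hx).1
    show (List.foldl (pvStepA As (-1) ((1 <<< ((-1 : Int) + 1).toNat) - 1))
        (List.replicate As.length false, 1, 0) (PySem.List.pyRange 1 ((As.length : Int) + 1))).1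
      = List.map (fun x => pvQueryB
          (pvMLoopB (As.length : Int) (-1) ((As.length : Int) + 1)
            (if Array.replicate ((-1 : Int) + 1).toNat ((As.length : Int) + 1) ≠ #[]
             then (Array.replicate ((-1 : Int) + 1).toNat ((As.length : Int) + 1)).setIfInBounds 0 0
             else Array.replicate ((-1 : Int) + 1).toNat ((As.length : Int) + 1)) As)
          x (List.countP (fun a => decide (x < a)) As + 1) (-1))
        (PySem.List.pyRange 1 ((As.length : Int) + 1))
    rw [hA]
    symm
    have hmem : ∀ b ∈ (PySem.List.pyRange 1 ((As.length : Int) + 1) 1).map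
        (fun x => pvQueryB
          (pvMLoopB (As.length : Int) (-1) ((As.length : Int) + 1)
            (if Array.replicate ((-1 : Int) + 1).toNat ((As.length : Int) + 1) ≠ #[]
             then (Array.replicate ((-1 : Int) + 1).toNat ((As.length : Int) + 1)).setIfInBounds 0 0
             else Array.replicate ((-1 : Int) + 1).toNat ((As.length : Int) + 1)) As)
          x (List.countP (fun a => decide (x < a)) As + 1) (-1)), b = false := by
      intro b hb
      obtain ⟨x, -, hbx⟩ := List.mem_map.1 hb
      rw [← hbx, pvQueryB]
      simp
    refine (List.eq_replicate_of_mem hmem).trans ?_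
    rw [List.length_map, PySem.List.length_pyRange_one]
    congr 1
    omega
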